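-- pv_equiv track=rewrite | github.com/SethHWeidman/codeforces | 033_hate_a/hate_a.py | hate_a
-- ===== SOURCE A (Python) =====
-- def hate_a(s: str) -> str:
--     '''
--     Core idea: `non_a_str_chars` (see below) must have:
--         * even length
--         * first half of "non a" characters equal to second half
--
--     Turns out there's a tricky edge case with this! See the comment below about the
--     branch I had to add after ChatGPT gave me a hint
--     '''
--     if s.endswith('a') and (len(s) > 1 and s[-2] != 'a'):
--         return ':('
--     non_a_str_chars = []
--     non_a_str_chars_indices = []
--     for i, char in enumerate(s):
--         if char != 'a':
--             non_a_str_chars.append(char)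
--             non_a_str_chars_indices.append(i)
--
--     num_non_a_chars = len(non_a_str_chars)
--     if num_non_a_chars % 2 != 0:
--         return ':('
--
--     half_non_a_str_chars = int(num_non_a_chars / 2)
--     second_half_non_a_str_chars = non_a_str_chars[half_non_a_str_chars:]
--     if non_a_str_chars[:half_non_a_str_chars] != second_half_non_a_str_chars:
--         return ':('
--     else:
--         start_of_second_half_non_a_chars = (
--             non_a_str_chars_indices[half_non_a_str_chars]
--             if len(non_a_str_chars_indices)
--             else len(s)
--         )
--         # I missed this branch initially - had to ask ChatGPT for a hint on why my code
--         # was failing. Strings like "bcbac" will return e.g. "bc" without the next two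
--         # lines, when they should actually return ":("
--         if 'a' in s[start_of_second_half_non_a_chars:]:
--             return ':('
--         return s[:start_of_second_half_non_a_chars]
-- ===== SOURCE B (Python) =====
-- def hate_a(s: str) -> str:
--     k = sum(c != 'a' for c in s)
--     if k % 2 != 0:
--         return ':('
--     cut = len(s) - k // 2
--     j = cut
--     for c in s[:cut]:
--         if c != 'a':
--             if j == len(s) or s[j] != c:
--                 return ':('
--             j += 1
--     return s[:cut] if j == len(s) else ':('
-- ===== Notes on version B (the rewrite author's own statement) =====
-- stated objective: alternative
-- what changed: Instead of building the filtered non-'a' list (plus A's parallel index list) and comparing its two halves, B only counts the non-'a' characters, computes the cut point arithmetically, and verifies with an in-place two-pointer scan that each non-'a' character of the prefix matches the suffix of the original string, building no intermediate lists; A's leading endswith('a') guard is dropped as redundant.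
import Mathlib
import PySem

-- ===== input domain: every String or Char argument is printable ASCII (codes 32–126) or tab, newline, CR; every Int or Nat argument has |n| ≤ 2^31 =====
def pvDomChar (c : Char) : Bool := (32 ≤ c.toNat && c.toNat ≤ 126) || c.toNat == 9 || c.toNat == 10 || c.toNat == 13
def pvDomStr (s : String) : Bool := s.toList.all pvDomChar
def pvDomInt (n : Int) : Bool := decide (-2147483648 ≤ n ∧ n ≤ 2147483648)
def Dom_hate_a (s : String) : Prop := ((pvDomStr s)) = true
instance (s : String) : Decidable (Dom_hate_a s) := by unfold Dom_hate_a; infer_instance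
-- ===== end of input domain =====

-- B replaces A's filtered-list-and-index-list construction and half-comparison by a counting
-- pass plus an in-place two-pointer scan of the original string (objective: alternative).

-- ===== PORT A =====
def hate_a (s : String) : String :=
  if PySem.Str.endswith s "a" = true ∧ (1 < PySem.Str.len s ∧ PySem.Str.pyGet? s (-2) ≠ some 'a') then
    ":("
  else
    let st := (PySem.List.enumerate s.toList).foldl
      (fun acc ic => if ic.2 != 'a' then (acc.1 ++ [ic.2], acc.2 ++ [ic.1]) else acc)
      (([] : List Char), ([] : List Int))
    let nonAStrChars := st.1
    let nonAStrCharsIndices := st.2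
    let numNonAChars : Int := nonAStrChars.length
    if PySem.Int.mod numNonAChars 2 ≠ 0 then ":("
    else
      let halfNonAStrChars := PySem.Int.truncdiv numNonAChars 2
      let secondHalf := PySem.List.slice nonAStrChars (some halfNonAStrChars)
      if PySem.List.slice nonAStrChars none (some halfNonAStrChars) ≠ secondHalf then ":("
      else
        let startOfSecondHalf : Int :=
          if nonAStrCharsIndices.length ≠ 0 then
            (PySem.List.pyGet? nonAStrCharsIndices halfNonAStrChars).getD 0
          else PySem.Str.len s
        if PySem.Str.isIn "a" (PySem.Str.slice s (some startOfSecondHalf)) = true then ":("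
        else PySem.Str.slice s none (some startOfSecondHalf)

-- ===== PORT B =====
-- the for-loop of Source B with its early returns: state j, `none` = the loop returned ':('
def pvMatchLoop (s : List Char) (t : List Char) (j : Int) : Option Int :=
  match t with
  | [] => some j
  | c :: rest =>
    if c != 'a' then
      if j = (s.length : Int) ∨ PySem.List.pyGet? s j ≠ some c then none
      else pvMatchLoop s rest (j + 1)
    else pvMatchLoop s rest j

def hate_a_alt (s : String) : String :=
  let k : Int := ((s.toList.countP (fun c => c != 'a') : Nat) : Int)
  if PySem.Int.mod k 2 ≠ 0 then ":("
  else
    let cut : Int := PySem.Str.len s - PySem.Int.floordiv k 2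
    match pvMatchLoop s.toList (PySem.Str.slice s none (some cut)).toList cut with
    | none => ":("
    | some j => if j = PySem.Str.len s then PySem.Str.slice s none (some cut) else ":("

-- ===== PRECONDITION & SPEC =====
def Spec_hate_a (s : String) (out : String) : Prop := out = hate_a_alt s
instance (s : String) (out : String) : Decidable (Spec_hate_a s out) := by unfold Spec_hate_a; infer_instance

-- ===== CLAIM (what is proved, stated in full; the proofs are below) =====
def Claim_equal_hate_a : Prop := ∀ (s : String), Dom_hate_a s → Spec_hate_a s (hate_a s)

-- ===== LEMMAS AND PROOFS =====

-- A's accumulating loop is the pair of an append-filter fold on characters and one on indices.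
theorem pvFoldAB (l : List (Int × Char)) (a : List Char) (b : List Int) :
    l.foldl (fun acc ic => if ic.2 != 'a' then (acc.1 ++ [ic.2], acc.2 ++ [ic.1]) else acc) (a, b)
      = (a ++ (l.filter (fun ic => ic.2 != 'a')).map Prod.snd,
         b ++ (l.filter (fun ic => ic.2 != 'a')).map Prod.fst) := by
  induction l generalizing a b with
  | nil => simp
  | cons x t ih =>
      rw [List.foldl_cons, List.filter_cons]
      by_cases hx : (x.2 != 'a') = true
      · rw [if_pos hx, if_pos hx, ih]; simp
      · rw [if_neg hx, if_neg hx, ih]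

-- the characters A collects are exactly the filtered list
theorem pvSndEnum (cs : List Char) (s : Int) :
    ((PySem.List.enumerate cs s).filter (fun ic => ic.2 != 'a')).map Prod.snd
      = cs.filter (fun c => c != 'a') := by
  induction cs generalizing s with
  | nil => simp [PySem.List.enumerate_nil]
  | cons c t ih =>
      rw [PySem.List.enumerate_cons]
      by_cases hc : (c != 'a') = true <;>
        simp [hc, ih]

-- the h-th collected index is the position of the h-th non-'a' character:
-- it is in range, carries a non-'a' character, and has exactly h non-'a' characters before it
theorem pvIdxSpec (cs : List Char) : ∀ (s : Int) (h : Nat) (j : Int),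
    (((PySem.List.enumerate cs s).filter (fun ic => ic.2 != 'a')).map Prod.fst)[h]? = some j →
    ∃ m : Nat, j = s + m ∧ m < cs.length ∧
      (∃ c, cs[m]? = some c ∧ (c != 'a') = true) ∧
      (cs.take m).countP (fun c => c != 'a') = h := by
  induction cs with
  | nil => intro s h j hj; simp [PySem.List.enumerate_nil] at hj
  | cons c t ih =>
      intro s h j hj
      rw [PySem.List.enumerate_cons] at hj
      by_cases hc : (c != 'a') = true
      · rw [List.filter_cons, if_pos (show (((s, c) : Int × Char).2 != 'a') = true from hc)] at hj
        cases h with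
        | zero =>
            simp at hj
            exact ⟨0, by simpa using hj.symm, by simp, ⟨c, by simp, hc⟩, by simp⟩
        | succ h' =>
            simp only [List.map_cons, List.getElem?_cons_succ] at hj
            obtain ⟨m, hjm, hmlt, hcm, hcount⟩ := ih (s + 1) h' j hj
            refine ⟨m + 1, by push_cast at hjm ⊢; omega, by simp only [List.length_cons]; omega,
              by simpa using hcm, ?_⟩
            simp [List.take_succ_cons, hc, hcount]
      · rw [List.filter_cons, if_neg (show ¬ (((s, c) : Int × Char).2 != 'a') = true from hc)] at hj
        obtain ⟨m, hjm, hmlt, hcm, hcount⟩ := ih (s + 1) h j hj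
        refine ⟨m + 1, by push_cast at hjm ⊢; omega, by simp only [List.length_cons]; omega,
          by simpa using hcm, ?_⟩
        simp [List.take_succ_cons, hc, hcount]

-- the crux for A: with an even non-'a' count 2h, if position m carries a non-'a' character with
-- exactly h non-'a' characters before it, then (i) if the last-h tail is 'a'-free then m = n - h,
-- and (ii) the tail from m contains an 'a' iff the last-h-characters tail does.
theorem pvPosMain (cs : List Char) (m h : Nat)
    (hk : (cs.filter (fun c => c != 'a')).length = 2 * h)
    (hcm : ∃ c, cs[m]? = some c ∧ (c != 'a') = true)
    (hcount : (cs.take m).countP (fun c => c != 'a') = h) :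
    (('a' ∉ cs.drop (cs.length - h) → m = cs.length - h)
     ∧ ('a' ∈ cs.drop m ↔ 'a' ∈ cs.drop (cs.length - h))) := by
  obtain ⟨c, hcg, hcp⟩ := hcm
  have hml : m < cs.length := (List.getElem?_eq_some_iff.mp hcg).1
  have hktot : cs.countP (fun c => c != 'a') = 2 * h := by
    rw [List.countP_eq_length_filter]; exact hk
  have hsplit : (cs.take m).countP (fun c => c != 'a')
      + (cs.drop m).countP (fun c => c != 'a') = 2 * h := by
    rw [← List.countP_append, List.take_append_drop]; exact hktot
  have hdropc : (cs.drop m).countP (fun c => c != 'a') = h := by omega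
  have hlendrop : (cs.drop m).length = cs.length - m := List.length_drop
  have hcle : (cs.drop m).countP (fun c => c != 'a') ≤ (cs.drop m).length :=
    List.countP_le_length
  have hmn : m + h ≤ cs.length := by omega
  have key : 'a' ∉ cs.drop (cs.length - h) → m = cs.length - h := by
    intro hna
    have hall : ∀ x ∈ cs.drop (cs.length - h), (x != 'a') = true := by
      intro x hx
      rw [bne_iff_ne]
      exact fun e => hna (e ▸ hx)
    have hc2 : (cs.drop (cs.length - h)).countP (fun c => c != 'a') = h := by
      rw [List.countP_eq_length.mpr hall, List.length_drop]; omega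
    by_contra hne
    have hmlt2 : m < cs.length - h := by omega
    have hdd : cs.drop (cs.length - h) = (cs.drop m).drop (cs.length - h - m) := by
      rw [List.drop_drop]; congr 1; omega
    have hsegsplit : cs.drop m
        = (cs.drop m).take (cs.length - h - m) ++ cs.drop (cs.length - h) := by
      rw [hdd]; exact (List.take_append_drop _ _).symm
    have hseg0 : ((cs.drop m).take (cs.length - h - m)).countP (fun c => c != 'a') = 0 := by
      have hcc := congrArg (List.countP (fun c => c != 'a')) hsegsplit
      rw [List.countP_append, hc2, hdropc] at hcc
      omega
    have hc_mem : c ∈ (cs.drop m).take (cs.length - h - m) := by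
      apply List.mem_of_getElem? (i := 0)
      rw [List.getElem?_take, if_pos (show (0:Nat) < cs.length - h - m by omega),
        List.getElem?_drop]
      simpa using hcg
    exact absurd hcp (by simpa using List.countP_eq_zero.mp hseg0 c hc_mem)
  refine ⟨key, ?_, ?_⟩
  · intro hmem
    by_contra hnb
    rw [key hnb] at hmem
    exact hnb hmem
  · intro hmem
    have hdd : cs.drop (cs.length - h) = (cs.drop m).drop (cs.length - h - m) := by
      rw [List.drop_drop]; congr 1; omega
    exact List.drop_subset _ _ (hdd ▸ hmem)

-- single-character membership bridge for Python's  'a' in <slice>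
theorem pvIsInDrop (s : String) (i : Int) (hi : 0 ≤ i) :
    PySem.Str.isIn "a" (PySem.Str.slice s (some i)) = true ↔ 'a' ∈ s.toList.drop i.toNat := by
  rw [PySem.Str.isIn_eq, PySem.Chars.isIn_iff_infix, PySem.Str.toList_slice,
    PySem.Chars.slice_eq_listSlice, PySem.List.slice_from _ hi]
  exact List.singleton_infix_iff 'a' _

theorem pvIsInDropNat (s : String) (m : Nat) :
    PySem.Str.isIn "a" (PySem.Str.slice s (some (m : Int))) = true ↔ 'a' ∈ s.toList.drop m := by
  rw [pvIsInDrop s m (by positivity)]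
  simp

-- B's two-pointer loop, characterised: it succeeds (with final pointer j + |filter t|) exactly
-- when the non-'a' characters of t form a prefix of L from position j on.
theorem pvLoopSpec (L : List Char) (t : List Char) : ∀ (j : Nat), j ≤ L.length →
    pvMatchLoop L t (j : Int) =
      if t.filter (fun c => c != 'a') <+: L.drop j
      then some (((j + (t.filter (fun c => c != 'a')).length : Nat) : Int)) else none := by
  induction t with
  | nil => intro j hj; simp [pvMatchLoop]
  | cons c rest ih =>
      intro j hj
      by_cases hc : (c != 'a') = true
      · rw [pvMatchLoop, if_pos hc, List.filter_cons, if_pos hc]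
        rcases Nat.lt_or_ge j L.length with hjl | hje
        · have hg : PySem.List.pyGet? L (j : Int) = some L[j] := by
            simp [pysem, hjl]
          have hdrop : L.drop j = L[j] :: L.drop (j + 1) := (List.getElem_cons_drop hjl).symm
          by_cases hLc : L[j] = c
          · rw [if_neg (by
              push Not
              exact ⟨by exact_mod_cast Nat.ne_of_lt hjl, by rw [hg, hLc]⟩)]
            have hcast : ((j : Int) + 1) = ((j + 1 : Nat) : Int) := by push_cast; ring
            rw [hcast, ih (j + 1) (by omega), hdrop, hLc]
            by_cases hpre : rest.filter (fun c => c != 'a') <+: L.drop (j + 1)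
            · rw [if_pos hpre, if_pos (List.cons_prefix_cons.mpr ⟨rfl, hpre⟩)]
              congr 1
              push_cast
              simp
              omega
            · rw [if_neg hpre, if_neg (by
                intro hcp
                exact hpre (List.cons_prefix_cons.mp hcp).2)]
          · rw [if_pos (Or.inr (by rw [hg]; simp [hLc]))]
            rw [if_neg (by
              rw [hdrop]
              intro hcp
              exact hLc (List.cons_prefix_cons.mp hcp).1.symm)]
        · have hjeq : j = L.length := by omega
          rw [if_pos (Or.inl (by exact_mod_cast hjeq))]
          rw [if_neg (by
            subst hjeq
            simp)]
      · rw [pvMatchLoop, if_neg hc, List.filter_cons, if_neg hc]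
        exact ih j hj

-- the non-'a' characters of the prefix match the suffix exactly when the filtered list's two
-- halves agree and the suffix is 'a'-free
theorem pvFEqU (n : List Char) (half : Nat)
    (hk : (n.filter (fun c => c != 'a')).length = 2 * half) :
    ((n.take (n.length - half)).filter (fun c => c != 'a') = n.drop (n.length - half)) ↔
      ((n.filter (fun c => c != 'a')).take half = (n.filter (fun c => c != 'a')).drop half ∧
       'a' ∉ n.drop (n.length - half)) := by
  have hhn : half ≤ n.length := by
    have := List.length_filter_le (fun c => c != 'a') n
    omega
  set t := n.take (n.length - half) with ht
  set u := n.drop (n.length - half) with hu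
  have hulen : u.length = half := by rw [hu, List.length_drop]; omega
  have hsplit : n.filter (fun c => c != 'a')
      = t.filter (fun c => c != 'a') ++ u.filter (fun c => c != 'a') := by
    rw [ht, hu, ← List.filter_append, List.take_append_drop]
  constructor
  · intro hfe
    have hna : 'a' ∉ u := by
      intro hmem
      rw [← hfe] at hmem
      have := List.of_mem_filter hmem
      simp at this
    have hfu : u.filter (fun c => c != 'a') = u :=
      List.filter_eq_self.mpr (fun x hx => by
        rw [bne_iff_ne]; exact fun e => hna (e ▸ hx))
    have hsplit2 : n.filter (fun c => c != 'a') = u ++ u := by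
      rw [hsplit, hfe, hfu]
    rw [hsplit2]
    refine ⟨?_, hna⟩
    rw [List.take_append_of_le_length (by omega), List.drop_append_of_le_length (by omega),
      ← hulen]
    simp
  · rintro ⟨hhalves, hna⟩
    have hfu : u.filter (fun c => c != 'a') = u :=
      List.filter_eq_self.mpr (fun x hx => by
        rw [bne_iff_ne]; exact fun e => hna (e ▸ hx))
    have hflen : (t.filter (fun c => c != 'a')).length = half := by
      have := congrArg List.length hsplit
      rw [List.length_append, hfu, hulen] at this
      omega
    have hftake : (n.filter (fun c => c != 'a')).take half = t.filter (fun c => c != 'a') := by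
      rw [hsplit, hfu, List.take_append_of_le_length (by omega), ← hflen]
      simp
    have hfdrop : (n.filter (fun c => c != 'a')).drop half = u := by
      rw [hsplit, hfu, List.drop_append_of_le_length (by omega), ← hflen]
      simp
    rw [hftake, hfdrop] at hhalves
    exact hhalves

-- evaluation of B: odd count → ':('; else compare the stripped prefix with the suffix
theorem pvBchar (s : String) :
    hate_a_alt s =
      if (s.toList.filter (fun c => c != 'a')).length % 2 ≠ 0 then ":("
      else if (s.toList.take (s.toList.length - (s.toList.filter (fun c => c != 'a')).length / 2)).filter (fun c => c != 'a')
              = s.toList.drop (s.toList.length - (s.toList.filter (fun c => c != 'a')).length / 2)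
      then PySem.Str.slice s none
        (some ((s.toList.length - (s.toList.filter (fun c => c != 'a')).length / 2 : Nat) : Int))
      else ":(" := by
  unfold hate_a_alt
  dsimp only
  set n := s.toList with hn
  set k := (n.filter (fun c => c != 'a')).length with hkdef
  have hkn : k ≤ n.length := List.length_filter_le _ _
  have hcnt : n.countP (fun c => c != 'a') = k := List.countP_eq_length_filter
  have hmod : PySem.Int.mod ((n.countP (fun c => c != 'a') : Nat) : Int) 2
      = ((k % 2 : Nat) : Int) := by
    rw [hcnt]
    exact_mod_cast PySem.Int.mod_natCast k 2
  rw [hmod]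
  by_cases hodd : k % 2 ≠ 0
  · rw [if_pos (show ((k % 2 : Nat) : Int) ≠ 0 by omega), if_pos hodd]
  · rw [if_neg (show ¬ ((k % 2 : Nat) : Int) ≠ 0 by omega), if_neg hodd]
    have hfl : PySem.Int.floordiv ((n.countP (fun c => c != 'a') : Nat) : Int) 2
        = ((k / 2 : Nat) : Int) := by
      rw [hcnt]
      exact_mod_cast PySem.Int.floordiv_natCast k 2
    have hcut : PySem.Str.len s - PySem.Int.floordiv ((n.countP (fun c => c != 'a') : Nat) : Int) 2
        = ((n.length - k / 2 : Nat) : Int) := by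
      rw [hfl, PySem.Str.len_eq, ← hn]
      exact (Nat.cast_sub (by omega)).symm
    rw [hcut]
    have hslice : (PySem.Str.slice s none (some ((n.length - k / 2 : Nat) : Int))).toList
        = n.take (n.length - k / 2) := by
      rw [PySem.Str.toList_slice, PySem.Chars.slice_eq_listSlice, ← hn,
        PySem.List.slice_to_natCast]
    rw [hslice, pvLoopSpec n _ (n.length - k / 2) (by omega)]
    set t := n.take (n.length - k / 2) with htdef
    set u := n.drop (n.length - k / 2) with hudef
    have hulen : u.length = k / 2 := by rw [hudef, List.length_drop]; omega
    by_cases hpre : t.filter (fun c => c != 'a') <+: u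
    · rw [if_pos hpre]
      dsimp only
      by_cases heq : t.filter (fun c => c != 'a') = u
      · rw [if_pos heq, if_pos (by
          rw [PySem.Str.len_eq, ← hn, heq, hulen]
          exact_mod_cast congrArg (fun (m : Nat) => (m : Int)) (by omega))]
      · rw [if_neg heq, if_neg (by
          rw [PySem.Str.len_eq, ← hn]
          intro hj
          have hjn : n.length - k / 2 + (t.filter (fun c => c != 'a')).length = n.length := by
            exact_mod_cast hj
          have hflen : (t.filter (fun c => c != 'a')).length = u.length := by omega
          exact heq (List.IsPrefix.eq_of_length hpre hflen))]
    · rw [if_neg hpre, if_neg (show ¬ t.filter (fun c => c != 'a') = u from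
        fun heq => hpre (heq ▸ List.prefix_refl u))]

theorem pvMainEq (s : String) : hate_a s = hate_a_alt s := by
  rw [pvBchar]
  unfold hate_a
  simp only [pvFoldAB, List.nil_append, pvSndEnum]
  set n := s.toList with hn
  set nonA := List.filter (fun c => c != 'a') n with hnonA
  have hkn : nonA.length ≤ n.length := by
    rw [hnonA]; exact List.length_filter_le _ _
  have hidxlen :
      (List.map Prod.fst (List.filter (fun ic => ic.2 != 'a')
        (PySem.List.enumerate n))).length = nonA.length := by
    have h1 := congrArg List.length (pvSndEnum n 0)
    simpa [hnonA] using h1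
  have hmodA : PySem.Int.mod ((nonA.length : Nat) : Int) 2 = ((nonA.length % 2 : Nat) : Int) :=
    by exact_mod_cast PySem.Int.mod_natCast nonA.length 2
  by_cases hodd : nonA.length % 2 ≠ 0
  case pos =>
    rw [if_pos (show (nonA.length % 2 : Nat) ≠ 0 from hodd)]
    by_cases hgrd : PySem.Str.endswith s "a" = true ∧ 1 < PySem.Str.len s ∧
        PySem.Str.pyGet? s (-2) ≠ some 'a'
    · rw [if_pos hgrd]
    · rw [if_neg hgrd, if_pos (by rw [hmodA]; exact_mod_cast Nat.cast_injective.ne_iff.mpr hodd)]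
  case neg =>
    rw [if_neg hodd]
    have heven : nonA.length % 2 = 0 := not_ne_iff.mp hodd
    have hk2 : nonA.length = 2 * (nonA.length / 2) := by omega
    set half := nonA.length / 2 with hhalf
    have hFEU := pvFEqU n half (by rw [← hnonA]; omega)
    by_cases hgrd : PySem.Str.endswith s "a" = true ∧ 1 < PySem.Str.len s ∧
        PySem.Str.pyGet? s (-2) ≠ some 'a'
    case pos =>
      rw [if_pos hgrd]
      obtain ⟨hend, hn1, hg2⟩ := hgrd
      obtain ⟨q, hq⟩ : ['a'] <:+ n := by
        rw [PySem.Str.endswith_eq] at hend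
        exact (PySem.Chars.endswith_iff _ _).mp (by simpa [← hn] using hend)
      have hnq : n.length = q.length + 1 := by rw [← hq]; simp
      have hlast : n[n.length - 1]? = some 'a' := by
        rw [← hq]
        have : (q ++ ['a']).length - 1 = q.length := by simp
        rw [this]
        simp
      have hn2 : 2 ≤ n.length := by
        rw [PySem.Str.len_eq, ← hn] at hn1; omega
      have hg2' : n[n.length - 2]? ≠ some 'a' := by
        rw [PySem.Str.pyGet?_eq, PySem.Chars.pyGet?_eq_listPyGet?, ← hn] at hg2
        rwa [PySem.List.pyGet?_neg_ofNat n 2 (by norm_num) hn2] at hg2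
      obtain ⟨c2, hc2⟩ : ∃ c2, n[n.length - 2]? = some c2 :=
        ⟨_, List.getElem?_eq_getElem (by omega)⟩
      have hc2ne : c2 ≠ 'a' := by rintro rfl; exact hg2' hc2
      have hk1 : 1 ≤ nonA.length := by
        have hmem2 : c2 ∈ nonA := by
          rw [hnonA]
          exact List.mem_filter.mpr ⟨List.mem_of_getElem? hc2, by simpa [bne_iff_ne] using hc2ne⟩
        exact List.length_pos_of_mem hmem2
      have hhalf1 : 1 ≤ half := by omega
      have hamem : 'a' ∈ n.drop (n.length - half) := by
        apply List.mem_of_getElem? (i := half - 1)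
        rw [List.getElem?_drop,
          show n.length - half + (half - 1) = n.length - 1 by omega]
        exact hlast
      rw [if_neg (by
        intro hfe
        exact (hFEU.mp hfe).2 hamem)]
    case neg =>
      rw [if_neg hgrd,
        if_neg (by rw [hmodA]; omega)]
      have htr : PySem.Int.truncdiv ((nonA.length : Nat) : Int) 2 = ((half : Nat) : Int) := by
        simp [PySem.Int.truncdiv, hhalf]
      rw [htr]
      have hsltake : PySem.List.slice nonA none (some ((half : Nat) : Int)) = nonA.take half :=
        PySem.List.slice_to_natCast nonA half
      have hsldrop : PySem.List.slice nonA (some ((half : Nat) : Int)) none = nonA.drop half :=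
        PySem.List.slice_from_natCast nonA half
      by_cases hsl : nonA.take half ≠ nonA.drop half
      case pos =>
        rw [if_pos (by rw [hsltake, hsldrop]; exact hsl)]
        rw [if_neg (by
          intro hfe
          exact hsl (hFEU.mp hfe).1)]
      case neg =>
        rw [if_neg (by rw [hsltake, hsldrop]; exact hsl)]
        have hhalves : nonA.take half = nonA.drop half := not_ne_iff.mp hsl
        by_cases hkz : nonA.length = 0
        case pos =>
          rw [if_neg (show ¬ (List.map Prod.fst (List.filter (fun ic => ic.2 != 'a')
            (PySem.List.enumerate n))).length ≠ 0 by rw [hidxlen]; omega)]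
          have hh0 : half = 0 := by omega
          have hna : 'a' ∉ n.drop (n.length - half) := by
            rw [hh0]
            simp
          have hfe : (n.take (n.length - half)).filter (fun c => c != 'a')
              = n.drop (n.length - half) :=
            hFEU.mpr ⟨hhalves, hna⟩
          rw [if_neg (by
            rw [pvIsInDrop s (PySem.Str.len s) (by rw [PySem.Str.len_eq]; positivity)]
            rw [PySem.Str.len_eq, ← hn]
            simp)]
          rw [if_pos hfe, hh0]
          rw [PySem.Str.len_eq, ← hn]
          norm_num
        case neg =>
          rw [if_pos (show (List.map Prod.fst (List.filter (fun ic => ic.2 != 'a')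
            (PySem.List.enumerate n))).length ≠ 0 by rw [hidxlen]; exact hkz)]
          obtain ⟨j, hj⟩ : ∃ j, (List.map Prod.fst (List.filter (fun ic => ic.2 != 'a')
              (PySem.List.enumerate n)))[half]? = some j :=
            ⟨_, List.getElem?_eq_getElem (by rw [hidxlen]; omega)⟩
          rw [PySem.List.pyGet?_natCast, hj, Option.getD_some]
          obtain ⟨m, hjm, hml, hcm, hcount⟩ := pvIdxSpec n 0 half j hj
          have hjm' : j = (m : Int) := by simpa using hjm
          rw [hjm']
          obtain ⟨hkey, hiff⟩ := pvPosMain n m half (by rw [← hnonA]; omega) hcm hcount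
          by_cases hmem : 'a' ∈ List.drop (n.length - half) n
          case pos =>
            rw [if_pos (by rw [pvIsInDropNat, ← hn]; exact hiff.mpr hmem)]
            rw [if_neg (by
              intro hfe
              exact (hFEU.mp hfe).2 hmem)]
          case neg =>
            rw [if_neg (by rw [pvIsInDropNat, ← hn]; exact fun h => hmem (hiff.mp h))]
            have hfe : (n.take (n.length - half)).filter (fun c => c != 'a')
                = n.drop (n.length - half) :=
              hFEU.mpr ⟨hhalves, hmem⟩
            rw [if_pos hfe, hkey hmem]

-- ===== VERDICT (by name: the statement is the Claim_ definition above) =====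
theorem hate_a_spec : Claim_equal_hate_a := by
  intro s _
  unfold Spec_hate_a
  exact pvMainEq s
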